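-- pv_equiv track=rewrite | github.com/zh-lov233r/origami-devops-platform | src/origami/models/htd_irl/planner.py | _task_status
-- ===== SOURCE A (Python) =====
-- from typing import Any
--
-- def _task_status(
--     level_2: list[str],
--     current_subtask: str,
--     state: dict[str, Any],
-- ) -> dict[str, str]:
--     completed = set(state.get("completed_subtasks", []))
--     blocked = set(state.get("blocked_subtasks", []))
--     status: dict[str, str] = {}
--     for subtask in level_2:
--         if subtask in completed:
--             status[subtask] = "completed"
--         elif subtask in blocked:
--             status[subtask] = "blocked"
--         elif subtask == current_subtask:
--             status[subtask] = "active"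
--         else:
--             status[subtask] = "pending"
--     return status
-- ===== SOURCE B (Python) =====
-- def _task_status(
--     level_2: list[str],
--     current_subtask: str,
--     state: dict[str, "Any"],
-- ) -> dict[str, str]:
--     subtasks = set(level_2)
--     status = {s: "pending" for s in level_2}
--     if current_subtask in subtasks:
--         status[current_subtask] = "active"
--     for s in state.get("blocked_subtasks", []):
--         if s in subtasks:
--             status[s] = "blocked"
--     for s in state.get("completed_subtasks", []):
--         if s in subtasks:
--             status[s] = "completed"
--     return status
-- ===== Notes on version B (the rewrite author's own statement) =====
-- stated objective: alternative
-- what changed: Replaces A's per-element if/elif dispatch (with precomputed sets) by layered override passes: initialize everything to pending, then overwrite active, then blocked, then completed, so the last pass realizes A's priority order.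
import Mathlib
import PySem

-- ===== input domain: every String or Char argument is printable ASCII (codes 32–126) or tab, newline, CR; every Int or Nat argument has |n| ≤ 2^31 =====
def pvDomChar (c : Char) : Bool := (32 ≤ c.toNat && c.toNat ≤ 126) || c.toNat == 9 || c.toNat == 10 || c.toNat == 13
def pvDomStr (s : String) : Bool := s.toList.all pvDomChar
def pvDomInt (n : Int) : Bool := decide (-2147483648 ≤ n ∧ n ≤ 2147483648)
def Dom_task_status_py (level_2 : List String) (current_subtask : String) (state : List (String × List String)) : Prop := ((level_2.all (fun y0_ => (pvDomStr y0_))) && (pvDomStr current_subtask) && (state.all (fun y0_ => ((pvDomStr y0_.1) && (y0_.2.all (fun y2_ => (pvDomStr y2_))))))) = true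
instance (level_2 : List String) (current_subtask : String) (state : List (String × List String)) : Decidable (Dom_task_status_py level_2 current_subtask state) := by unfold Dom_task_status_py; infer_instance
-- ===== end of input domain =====

-- B replaces A's per-element if/elif dispatch by layered override passes (pending, then
-- active, then blocked, then completed), an alternative decomposition of the same cost.

-- ===== PORT A =====
def task_status_py (level_2 : List String) (current_subtask : String) (state : List (String × List String)) : List (String × String) :=
  let completed : PySem.Set String := PySem.Set.ofList ((PySem.Dict.mk state).getD "completed_subtasks" [])
  let blocked : PySem.Set String := PySem.Set.ofList ((PySem.Dict.mk state).getD "blocked_subtasks" [])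
  let status :=
    level_2.foldl (fun d subtask =>
      if PySem.Set.contains completed subtask then d.insert subtask "completed"
      else if PySem.Set.contains blocked subtask then d.insert subtask "blocked"
      else if subtask == current_subtask then d.insert subtask "active"
      else d.insert subtask "pending") (PySem.Dict.empty : PySem.Dict String String)
  status.items

-- ===== PORT B =====
def task_status_py_alt (level_2 : List String) (current_subtask : String) (state : List (String × List String)) : List (String × String) :=
  let subtasks : PySem.Set String := PySem.Set.ofList level_2
  let status0 :=
    level_2.foldl (fun d s => d.insert s "pending") (PySem.Dict.empty : PySem.Dict String String)
  let status1 :=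
    if PySem.Set.contains subtasks current_subtask then status0.insert current_subtask "active"
    else status0
  let status2 :=
    ((PySem.Dict.mk state).getD "blocked_subtasks" []).foldl
      (fun d s => if PySem.Set.contains subtasks s then d.insert s "blocked" else d) status1
  let status3 :=
    ((PySem.Dict.mk state).getD "completed_subtasks" []).foldl
      (fun d s => if PySem.Set.contains subtasks s then d.insert s "completed" else d) status2
  status3.items

-- ===== PRECONDITION & SPEC =====
def Spec_task_status_py (level_2 : List String) (current_subtask : String) (state : List (String × List String)) (out : List (String × String)) : Prop := out = task_status_py_alt level_2 current_subtask state
instance (level_2 : List String) (current_subtask : String) (state : List (String × List String)) (out : List (String × String)) : Decidable (Spec_task_status_py level_2 current_subtask state out) := by unfold Spec_task_status_py; infer_instance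

-- ===== CLAIM (what is proved, stated in full; the proofs are below) =====
def Claim_equal_task_status_py : Prop := ∀ (level_2 : List String) (current_subtask : String) (state : List (String × List String)), Dom_task_status_py level_2 current_subtask state → Spec_task_status_py level_2 current_subtask state (task_status_py level_2 current_subtask state)

-- ===== LEMMAS AND PROOFS =====

-- A dict whose key list is L and whose value at key s is g s.
def pvM (g : String → String) (L : List String) : PySem.Dict String String :=
  PySem.Dict.mk (L.map (fun s => (s, g s)))

theorem pvM_congr (g g' : String → String) (L : List String)
    (h : ∀ s ∈ L, g s = g' s) : pvM g L = pvM g' L := by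
  unfold pvM
  exact congrArg PySem.Dict.mk (List.map_congr_left (fun s hs => by rw [h s hs]))

theorem pvM_contains (g : String → String) (L : List String) (k : String) :
    (pvM g L).contains k = decide (k ∈ L) := by
  rw [PySem.Dict.contains_eq_decide_mem_keys]
  simp [pvM, PySem.Dict.keys]

theorem pvM_insert_mem (g : String → String) (L : List String) (k : String) (v : String)
    (hk : k ∈ L) :
    (pvM g L).insert k v = pvM (fun s => if s = k then v else g s) L := by
  have hc : (pvM g L).contains k = true := by rw [pvM_contains]; simpa
  apply PySem.Dict.ext
  rw [PySem.Dict.items_insert_of_contains _ v hc]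
  show (List.map _ _).map _ = _
  rw [List.map_map]
  refine List.map_congr_left (fun s hs => ?_)
  by_cases h : s = k
  · subst h; simp
  · simp [h, Function.comp]

theorem pvM_insert_not_mem (g : String → String) (L : List String) (k : String) (v : String)
    (hk : k ∉ L) :
    (pvM g L).insert k v = pvM (fun s => if s = k then v else g s) (L ++ [k]) := by
  have hc : (pvM g L).contains k = false := by rw [pvM_contains]; simpa
  apply PySem.Dict.ext
  rw [PySem.Dict.items_insert_of_not_contains _ v hc]
  show (List.map _ _) ++ _ = _
  simp only [pvM, List.map_append, List.map_cons, List.map_nil]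
  congr 1
  refine List.map_congr_left (fun s hs => ?_)
  have h : s ≠ k := fun h => hk (h ▸ hs)
  simp [h]

-- a loop inserting a key-determined value builds the dict keyed by the deduplicated list
theorem pvBuild (f : String → String) (xs : List String) :
    xs.foldl (fun d s => d.insert s (f s)) (PySem.Dict.empty : PySem.Dict String String)
      = pvM f (PySem.Set.ofList xs) := by
  induction xs using List.reverseRecOn with
  | nil => rfl
  | append_singleton xs x ih =>
    rw [List.foldl_append, List.foldl_cons, List.foldl_nil, ih,
        PySem.Set.ofList_append_singleton, PySem.Set.add_eq_ite]
    by_cases h : x ∈ PySem.Set.ofList xs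
    · rw [if_pos h, pvM_insert_mem _ _ _ _ h]
      congr 1; funext s; by_cases hs : s = x <;> simp [hs]
    · rw [if_neg h, pvM_insert_not_mem _ _ _ _ h]
      congr 1; funext s; by_cases hs : s = x <;> simp [hs]

theorem pvSetContains (L : List String) (s : String) :
    PySem.Set.contains L s = decide (s ∈ L) := by
  by_cases h : s ∈ L <;> simp [PySem.Set.contains, h]

-- a guarded override pass rewrites the value of every key that occurs in ys
theorem pvPass (v : String) (ys : List String) (L : List String) (g : String → String) :
    ys.foldl (fun d s => if PySem.Set.contains L s then d.insert s v else d) (pvM g L)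
      = pvM (fun s => if s ∈ ys then v else g s) L := by
  induction ys generalizing g with
  | nil =>
    rw [List.foldl_nil]
    apply pvM_congr; intro s _; simp
  | cons y t ih =>
    rw [List.foldl_cons]
    by_cases hy : y ∈ L
    · rw [pvSetContains, if_pos (by simpa), pvM_insert_mem _ _ _ _ hy, ih]
      apply pvM_congr; intro s _
      by_cases h1 : s ∈ t <;> by_cases h2 : s = y <;> simp [h1, h2]
    · rw [pvSetContains, if_neg (by simpa), ih]
      apply pvM_congr; intro s hs
      have h2 : s ≠ y := fun e => hy (e ▸ hs)
      by_cases h1 : s ∈ t <;> simp [h1, h2]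

-- ===== VERDICT (by name: the statement is the Claim_ definition above) =====
theorem task_status_py_spec : Claim_equal_task_status_py := by
  intro lv cs st _
  unfold Spec_task_status_py task_status_py task_status_py_alt
  simp only []
  set cl := (PySem.Dict.mk st).getD "completed_subtasks" [] with hcl
  set bl := (PySem.Dict.mk st).getD "blocked_subtasks" [] with hbl
  -- A's loop inserts a key-determined value
  have hstepA : (fun (d : PySem.Dict String String) subtask =>
      if PySem.Set.contains (PySem.Set.ofList cl) subtask then d.insert subtask "completed"
      else if PySem.Set.contains (PySem.Set.ofList bl) subtask then d.insert subtask "blocked"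
      else if subtask == cs then d.insert subtask "active"
      else d.insert subtask "pending")
      = fun (d : PySem.Dict String String) s => d.insert s
          (if s ∈ cl then "completed"
           else if s ∈ bl then "blocked"
           else if s = cs then "active" else "pending") := by
    funext d s
    simp only [pvSetContains, PySem.Set.mem_ofList, beq_iff_eq, decide_eq_true_eq]
    split_ifs <;> simp_all
  rw [hstepA, pvBuild, pvBuild]
  -- B's layered passes
  by_cases hccur : cs ∈ lv
  · rw [pvSetContains, if_pos (by simp [hccur]),
        pvM_insert_mem _ _ _ _ ((PySem.Set.mem_ofList _ _).mpr hccur), pvPass, pvPass]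
  · rw [pvSetContains, if_neg (by simp [hccur]), pvPass, pvPass]
    refine congrArg PySem.Dict.items (pvM_congr _ _ _ (fun s hs => ?_))
    have h3 : s ≠ cs := fun e => hccur (e ▸ (PySem.Set.mem_ofList _ _).mp hs)
    by_cases h1 : s ∈ cl <;> by_cases h2 : s ∈ bl <;> simp [h1, h2, h3]
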